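-- pv_equiv track=rewrite | github.com/ErranderLee/ProblemSolving | 백준/BOJ21609.py | find_largest_block_group
-- ===== SOURCE A (Python) =====
-- def find_largest_block_group(maps, block_groups):
--     largest_block_group = []
--     for block_group in block_groups:
--         if len(largest_block_group) < len(block_group):
--             largest_block_group = []
--             largest_block_group.extend(block_group)
--         elif len(largest_block_group) == len(block_group):
--             largest_block_group_rainbow_count = 0
--             block_group_rainbow_count = 0
--             for i in range(len(largest_block_group)):
--                 if maps[block_group[i][0]][block_group[i][1]] == 0:
--                     block_group_rainbow_count += 1
--                 if maps[largest_block_group[i][0]][largest_block_group[i][1]] == 0: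
--                     largest_block_group_rainbow_count += 1
--             if block_group_rainbow_count > largest_block_group_rainbow_count:
--                 largest_block_group = []
--                 largest_block_group.extend(block_group)
--             elif block_group_rainbow_count == largest_block_group_rainbow_count:
--                 temp = []
--                 temp.append((block_group[0][0], block_group[0][1], 0))
--                 temp.append((largest_block_group[0][0], largest_block_group[0][1], 1))
--                 temp.sort(key=lambda x: (x[0], x[1]), reverse=True)
--                 if temp[0][2] == 0:
--                     largest_block_group = []
--                     largest_block_group.extend(block_group)
--     return largest_block_group
-- ===== SOURCE B (Python) =====
-- def _bg_key(maps, bg):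
--     rainbow = sum(1 for r, c in bg if maps[r][c] == 0)
--     return (rainbow, bg[0][0], bg[0][1])
--
-- def find_largest_block_group(maps, block_groups):
--     if not block_groups:
--         return []
--     top = max(len(bg) for bg in block_groups)
--     candidates = [bg for bg in block_groups if len(bg) == top]
--     if len(candidates) == 1:
--         return list(candidates[0])
--     best = candidates[0]
--     best_key = _bg_key(maps, best)
--     for bg in candidates[1:]:
--         k = _bg_key(maps, bg)
--         if k >= best_key:
--             best, best_key = bg, k
--     return list(best)
-- ===== Notes on version B (the rewrite author's own statement) =====
-- stated objective: simpler
-- what changed: A's single running-max loop with an inline double rainbow-count loop and a two-element sort trick for position ties is replaced by a two-pass selection: take the maximal group length, filter the candidates of that length, and pick the last candidate whose composite (rainbow, row, col) key is >= the best so far; rainbow counts and first-cell positions are only ever computed for max-length candidates.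
import Mathlib
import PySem

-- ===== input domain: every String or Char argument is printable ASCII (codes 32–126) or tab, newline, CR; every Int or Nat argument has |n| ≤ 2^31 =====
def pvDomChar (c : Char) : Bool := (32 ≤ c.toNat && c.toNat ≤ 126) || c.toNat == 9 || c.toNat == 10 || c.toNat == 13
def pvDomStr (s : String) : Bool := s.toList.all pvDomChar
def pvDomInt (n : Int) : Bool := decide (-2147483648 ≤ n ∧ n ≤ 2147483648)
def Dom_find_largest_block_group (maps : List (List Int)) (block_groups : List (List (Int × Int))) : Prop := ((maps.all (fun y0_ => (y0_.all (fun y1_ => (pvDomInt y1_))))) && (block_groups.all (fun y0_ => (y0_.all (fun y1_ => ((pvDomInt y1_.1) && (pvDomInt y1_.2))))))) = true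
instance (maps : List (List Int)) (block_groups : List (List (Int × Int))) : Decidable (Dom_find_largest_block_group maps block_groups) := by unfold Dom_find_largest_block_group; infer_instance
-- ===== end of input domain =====

-- B replaces A's running-max cascade (inline rainbow loop + two-element sort trick) by a
-- two-pass selection: filter the groups of maximal size, then keep the last group whose
-- composite (rainbow, row, col) key is ≥ the best so far (objective: simpler decomposition).

-- ===== PORT A =====
def find_largest_block_group (maps : List (List Int)) (block_groups : List (List (Int × Int))) : List (Int × Int) :=
  block_groups.foldl (fun largest bg =>
    if largest.length < bg.length then bg
    else if largest.length = bg.length then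
      let counts := (PySem.List.pyRange 0 (largest.length : Int) 1).foldl
        (fun (acc : Int × Int) i =>
          let p := PySem.List.pyGetD bg i (0, 0)
          let acc := if PySem.List.pyGetD (PySem.List.pyGetD maps p.1 []) p.2 1 == 0 then (acc.1, acc.2 + 1) else acc
          let q := PySem.List.pyGetD largest i (0, 0)
          if PySem.List.pyGetD (PySem.List.pyGetD maps q.1 []) q.2 1 == 0 then (acc.1 + 1, acc.2) else acc)
        (0, 0)
      -- acc.1 = largest_block_group_rainbow_count, acc.2 = block_group_rainbow_count
      if counts.1 < counts.2 then bg
      else if counts.2 = counts.1 then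
        let b0 := PySem.List.pyGetD bg 0 (0, 0)
        let l0 := PySem.List.pyGetD largest 0 (0, 0)
        let temp := PySem.List.sorted2 [(b0.1, b0.2, (0 : Int)), (l0.1, l0.2, (1 : Int))]
          (fun x => x.1) (fun x => x.2.1) true
        if (PySem.List.pyGetD temp 0 (0, 0, 0)).2.2 == 0 then bg else largest
      else largest
    else largest) []

-- ===== PORT B =====
-- rainbow count of a group: sum(1 for r, c in bg if maps[r][c] == 0)
def pvRainbow (maps : List (List Int)) (bg : List (Int × Int)) : Int :=
  ((bg.countP (fun rc => PySem.List.pyGetD (PySem.List.pyGetD maps rc.1 []) rc.2 1 == 0) : Nat) : Int)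

-- the composite key (rainbow, bg[0][0], bg[0][1]) of _bg_key
def pvKeyB (maps : List (List Int)) (bg : List (Int × Int)) : Int × Int × Int :=
  (pvRainbow maps bg, (PySem.List.pyGetD bg 0 (0, 0)).1, (PySem.List.pyGetD bg 0 (0, 0)).2)

-- Python's lexicographic tuple comparison k >= best_key, components spelt out
def pvKeyGE (a b : Int × Int × Int) : Bool :=
  (b.1 < a.1) || (a.1 == b.1 && ((b.2.1 < a.2.1) || (a.2.1 == b.2.1 && b.2.2 ≤ a.2.2)))

def find_largest_block_group_alt (maps : List (List Int)) (block_groups : List (List (Int × Int))) : List (Int × Int) :=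
  match block_groups with
  | [] => []
  | _ :: _ =>
    let top := (PySem.List.max? (block_groups.map List.length) (fun n => n)).getD 0
    match block_groups.filter (fun g => g.length == top) with
    | [] => []   -- unreachable: the maximal length is attained
    | c :: rest =>
      if rest.isEmpty then c
      else (rest.foldl (fun (st : List (Int × Int) × (Int × Int × Int)) bg =>
              let k := pvKeyB maps bg
              if pvKeyGE k st.2 then (bg, k) else st) (c, pvKeyB maps c)).1

-- ===== PRECONDITION & SPEC =====
-- a Python-valid cell reference maps[r][c] (negative indices allowed, as in Python)
def pvCellOK (maps : List (List Int)) (rc : Int × Int) : Bool :=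
  (-(maps.length : Int) ≤ rc.1 && rc.1 < (maps.length : Int)) &&
  (-(((PySem.List.pyGetD maps rc.1 []).length : Int)) ≤ rc.2 &&
    rc.2 < ((PySem.List.pyGetD maps rc.1 []).length : Int))

-- group i's length is maximal among the groups before it (a "running-max attainer")
def pvPrefMax (block_groups : List (List (Int × Int))) (i : Nat) : Bool :=
  (List.range i).all (fun k => (block_groups.getD k []).length ≤ (block_groups.getD i []).length)

-- (The two total ports agree on every input; Pre_ marks where the Python A returns.)
-- Pre_ is exactly the set of inputs on which the Python A returns: A raises IndexError iff the
-- first group is empty, or some group that ties the running maximum length (equivalently: a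
-- running-max attainer sharing its length with another running-max attainer) has an out-of-range cell.
def Pre_find_largest_block_group (maps : List (List Int)) (block_groups : List (List (Int × Int))) : Prop :=
  ((match block_groups with | [] => true | g :: _ => !g.isEmpty) &&
   (List.range block_groups.length).all (fun i =>
     !(pvPrefMax block_groups i &&
       (List.range block_groups.length).any (fun j =>
         j ≠ i && pvPrefMax block_groups j &&
         (block_groups.getD j []).length == (block_groups.getD i []).length)) ||
     (block_groups.getD i []).all (pvCellOK maps))) = true
instance (maps : List (List Int)) (block_groups : List (List (Int × Int))) : Decidable (Pre_find_largest_block_group maps block_groups) := by unfold Pre_find_largest_block_group; infer_instance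

def pvWitness_find_largest_block_group : List (List Int) × (List (List (Int × Int))) :=
  ([[1, 0], [0, 2]], [[(0, 0)], [(1, 1), (0, 1)]])

def Spec_find_largest_block_group (maps : List (List Int)) (block_groups : List (List (Int × Int))) (out : List (Int × Int)) : Prop := out = find_largest_block_group_alt maps block_groups
instance (maps : List (List Int)) (block_groups : List (List (Int × Int))) (out : List (Int × Int)) : Decidable (Spec_find_largest_block_group maps block_groups out) := by unfold Spec_find_largest_block_group; infer_instance

-- ===== CLAIM (what is proved, stated in full; the proofs are below) =====
def Claim_equal_find_largest_block_group : Prop := ∀ (maps : List (List Int)) (block_groups : List (List (Int × Int))), Dom_find_largest_block_group maps block_groups → Pre_find_largest_block_group maps block_groups → Spec_find_largest_block_group maps block_groups (find_largest_block_group maps block_groups)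

-- ===== LEMMAS AND PROOFS =====

-- "challenger g beats (or ties, last-wins) incumbent b" as one lexicographic comparison
def pvFullGE (maps : List (List Int)) (g b : List (Int × Int)) : Bool :=
  decide (b.length < g.length) ||
  (b.length == g.length && pvKeyGE (pvKeyB maps g) (pvKeyB maps b))

def pvSel (maps : List (List Int)) (b g : List (Int × Int)) : List (Int × Int) :=
  if pvFullGE maps g b then g else b

def pvRBStep (maps : List (List Int)) (b g : List (Int × Int)) : List (Int × Int) :=
  if pvKeyGE (pvKeyB maps g) (pvKeyB maps b) then g else b

def pvMaxLen : List (List (Int × Int)) → Nat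
  | [] => 0
  | g :: gs => Nat.max g.length (pvMaxLen gs)

def pvPick (maps : List (List Int)) : List (List (Int × Int)) → List (Int × Int)
  | [] => []
  | c :: rest => rest.foldl (pvRBStep maps) c

theorem pv_sorted2_pair (x y : Int × Int × Int) :
    PySem.List.sorted2 [x, y] (fun t => t.1) (fun t => t.2.1) true =
      if (decide (x.1 < y.1) || (!decide (y.1 < x.1) && decide (x.2.1 < y.2.1))) then [y, x]
      else [x, y] := by
  simp only [PySem.List.sorted2, List.foldl, PySem.List.insertBy]
  split <;> simp_all

theorem pv_stepA_eq (maps : List (List Int)) (b g : List (Int × Int)) :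
    (fun largest bg =>
      if largest.length < bg.length then bg
      else if largest.length = bg.length then
        let counts := (PySem.List.pyRange 0 (largest.length : Int) 1).foldl
          (fun (acc : Int × Int) i =>
            let p := PySem.List.pyGetD bg i (0, 0)
            let acc := if PySem.List.pyGetD (PySem.List.pyGetD maps p.1 []) p.2 1 == 0 then (acc.1, acc.2 + 1) else acc
            let q := PySem.List.pyGetD largest i (0, 0)
            if PySem.List.pyGetD (PySem.List.pyGetD maps q.1 []) q.2 1 == 0 then (acc.1 + 1, acc.2) else acc)
          (0, 0)
        if counts.1 < counts.2 then bg
        else if counts.2 = counts.1 then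
          let b0 := PySem.List.pyGetD bg 0 (0, 0)
          let l0 := PySem.List.pyGetD largest 0 (0, 0)
          let temp := PySem.List.sorted2 [(b0.1, b0.2, (0 : Int)), (l0.1, l0.2, (1 : Int))]
            (fun x => x.1) (fun x => x.2.1) true
          if (PySem.List.pyGetD temp 0 (0, 0, 0)).2.2 == 0 then bg else largest
        else largest
      else largest : List (Int × Int) → List (Int × Int) → List (Int × Int)) b g = pvSel maps b g := by
  dsimp only
  unfold pvSel pvFullGE
  by_cases h1 : b.length < g.length
  · simp [h1]
  · simp only [if_neg h1]
    by_cases h2 : b.length = g.length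
    · simp only [if_pos h2]
      have hsplit : (fun (acc : Int × Int) (i : Int) =>
            let p := PySem.List.pyGetD g i (0, 0)
            let acc := if PySem.List.pyGetD (PySem.List.pyGetD maps p.1 []) p.2 1 == 0 then (acc.1, acc.2 + 1) else acc
            let q := PySem.List.pyGetD b i (0, 0)
            if PySem.List.pyGetD (PySem.List.pyGetD maps q.1 []) q.2 1 == 0 then (acc.1 + 1, acc.2) else acc)
          = (fun (acc : Int × Int) (i : Int) =>
            ((fun (a : Int) i => if (fun rc : Int × Int => PySem.List.pyGetD (PySem.List.pyGetD maps rc.1 []) rc.2 1 == 0) (PySem.List.pyGetD b i (0,0)) then a + 1 else a) acc.1 i,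
             (fun (a : Int) i => if (fun rc : Int × Int => PySem.List.pyGetD (PySem.List.pyGetD maps rc.1 []) rc.2 1 == 0) (PySem.List.pyGetD g i (0,0)) then a + 1 else a) acc.2 i)) := by
        funext acc i
        dsimp only
        split <;> split <;> rfl
      rw [hsplit, PySem.List.foldl_prod_mk
            (f := fun (a : Int) (i : Int) => if (fun rc : Int × Int => PySem.List.pyGetD (PySem.List.pyGetD maps rc.1 []) rc.2 1 == 0) (PySem.List.pyGetD b i (0,0)) then a + 1 else a)
            (g := fun (a : Int) (i : Int) => if (fun rc : Int × Int => PySem.List.pyGetD (PySem.List.pyGetD maps rc.1 []) rc.2 1 == 0) (PySem.List.pyGetD g i (0,0)) then a + 1 else a)]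
      have hb : List.foldl (fun (a : Int) (i : Int) => if (fun rc : Int × Int => PySem.List.pyGetD (PySem.List.pyGetD maps rc.1 []) rc.2 1 == 0) (PySem.List.pyGetD b i (0,0)) then a + 1 else a) 0 (PySem.List.pyRange 0 (b.length : Int) 1) = pvRainbow maps b := by
        rw [PySem.List.foldl_pyRange_zero_pyGetD' b (0,0)
              (f := fun (a : Int) rc => if (fun rc : Int × Int => PySem.List.pyGetD (PySem.List.pyGetD maps rc.1 []) rc.2 1 == 0) rc then a + 1 else a)]
        rw [PySem.List.foldl_count_if]
        simp [pvRainbow]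
      have hg : List.foldl (fun (a : Int) (i : Int) => if (fun rc : Int × Int => PySem.List.pyGetD (PySem.List.pyGetD maps rc.1 []) rc.2 1 == 0) (PySem.List.pyGetD g i (0,0)) then a + 1 else a) 0 (PySem.List.pyRange 0 (b.length : Int) 1) = pvRainbow maps g := by
        rw [h2]
        rw [PySem.List.foldl_pyRange_zero_pyGetD' g (0,0)
              (f := fun (a : Int) rc => if (fun rc : Int × Int => PySem.List.pyGetD (PySem.List.pyGetD maps rc.1 []) rc.2 1 == 0) rc then a + 1 else a)]
        rw [PySem.List.foldl_count_if]
        simp [pvRainbow]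
      rw [hb, hg]
      dsimp only
      by_cases h3 : pvRainbow maps b < pvRainbow maps g
      · simp [h3, pvKeyGE, pvKeyB, h2]
      · simp only [if_neg h3]
        by_cases h4 : pvRainbow maps g = pvRainbow maps b
        · simp only [if_pos h4]
          rw [pv_sorted2_pair]
          have e1 : ∀ (u v : Int × Int × Int), PySem.List.pyGetD [u, v] 0 (0, 0, 0) = u := by
            intro u v; rfl
          simp only [pvKeyGE, pvKeyB, h4]
          simp only [Bool.or_eq_true, Bool.and_eq_true, decide_eq_true_eq,
            Bool.not_eq_true', decide_eq_false_iff_not, beq_iff_eq, lt_self_iff_false,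
            false_or, true_and]
          rw [apply_ite (fun (l : List (Int × Int × Int)) => (PySem.List.pyGetD l 0 (0, 0, 0)).2.2)]
          simp only [e1]
          split_ifs <;> first | rfl | omega
        · simp only [if_neg h4]
          simp [pvKeyGE, pvKeyB, h2, h3, h4]
    · simp [h1, h2]

theorem pv_A_eq_fold (maps : List (List Int)) (bgs : List (List (Int × Int))) :
    find_largest_block_group maps bgs = bgs.foldl (pvSel maps) [] := by
  unfold find_largest_block_group
  exact List.foldl_ext _ (pvSel maps) [] (fun acc b _ => pv_stepA_eq maps acc b)

theorem pv_fullGE_nil (maps : List (List Int)) (g : List (Int × Int)) :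
    pvFullGE maps g [] = true := by
  cases g with
  | nil => simp [pvFullGE, pvKeyGE, pvKeyB, pvRainbow]
  | cons x xs => simp [pvFullGE]

theorem pvMaxLen_cons (g : List (Int × Int)) (gs : List (List (Int × Int))) :
    pvMaxLen (g :: gs) = Nat.max g.length (pvMaxLen gs) := rfl

theorem pv_len_le_maxLen (g : List (Int × Int)) (gs : List (List (Int × Int))) :
    g.length ≤ pvMaxLen (g :: gs) := by
  rw [pvMaxLen_cons]; exact Nat.le_max_left _ _

theorem pv_rbStep_len (maps : List (List Int)) (b h : List (Int × Int))
    (hbh : b.length = h.length) : (pvRBStep maps b h).length = b.length := by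
  unfold pvRBStep; split <;> omega

theorem pv_fold_eq_pick (maps : List (List Int)) (gs : List (List (Int × Int)))
    (b : List (Int × Int)) :
    gs.foldl (pvSel maps) b =
      pvPick maps ((b :: gs).filter (fun g => g.length == pvMaxLen (b :: gs))) := by
  induction gs generalizing b with
  | nil => simp [pvPick, pvMaxLen]
  | cons h t ih =>
    simp only [List.foldl_cons]
    rcases Nat.lt_trichotomy b.length h.length with hlt | heq | hgt
    · have hsel : pvSel maps b h = h := by simp [pvSel, pvFullGE, hlt]
      rw [hsel, ih h]
      have hM : pvMaxLen (b :: h :: t) = pvMaxLen (h :: t) := by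
        rw [pvMaxLen_cons]
        exact Nat.max_eq_right (le_trans (Nat.le_of_lt hlt) (pv_len_le_maxLen h t))
      rw [hM]
      have hbf : (b.length == pvMaxLen (h :: t)) = false := by
        have := pv_len_le_maxLen h t
        simp only [beq_eq_false_iff_ne, ne_eq]; omega
      simp [List.filter_cons, hbf]
    · have hsel : pvSel maps b h = pvRBStep maps b h := by
        have h1 : ¬ b.length < h.length := by omega
        simp [pvSel, pvFullGE, pvRBStep, heq]
      rw [hsel, ih (pvRBStep maps b h)]
      have hwl : (pvRBStep maps b h).length = b.length := pv_rbStep_len maps b h heq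
      by_cases hc : pvMaxLen t ≤ b.length
      · have hM1 : pvMaxLen (b :: h :: t) = b.length := by
          simp only [pvMaxLen_cons, Nat.max_def]; split_ifs <;> omega
        have hM2 : pvMaxLen (pvRBStep maps b h :: t) = b.length := by
          simp only [pvMaxLen_cons, Nat.max_def, hwl]; split_ifs <;> omega
        rw [hM1, hM2]
        have e1 : (b.length == b.length) = true := by simp
        have e2 : (h.length == b.length) = true := by simp [← heq]
        have e3 : ((pvRBStep maps b h).length == b.length) = true := by simp [hwl]
        simp only [List.filter_cons, e1, e2, e3, if_pos]
        simp only [pvPick, List.foldl_cons]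
      · have hM1 : pvMaxLen (b :: h :: t) = pvMaxLen t := by
          simp only [pvMaxLen_cons, Nat.max_def]; split_ifs <;> omega
        have hM2 : pvMaxLen (pvRBStep maps b h :: t) = pvMaxLen t := by
          simp only [pvMaxLen_cons, Nat.max_def, hwl]; split_ifs <;> omega
        rw [hM1, hM2]
        have e1 : (b.length == pvMaxLen t) = false := by
          simp only [beq_eq_false_iff_ne, ne_eq]; omega
        have e2 : (h.length == pvMaxLen t) = false := by
          simp only [beq_eq_false_iff_ne, ne_eq]; omega
        have e3 : ((pvRBStep maps b h).length == pvMaxLen t) = false := by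
          simp only [beq_eq_false_iff_ne, ne_eq]; omega
        simp only [List.filter_cons, e1, e2, e3, Bool.false_eq_true, if_false]
    · have hsel : pvSel maps b h = b := by
        have h1 : ¬ b.length < h.length := by omega
        have h2 : (b.length == h.length) = false := by
          simp only [beq_eq_false_iff_ne, ne_eq]; omega
        simp [pvSel, pvFullGE, h1, h2]
      rw [hsel, ih b]
      have hM : pvMaxLen (b :: h :: t) = pvMaxLen (b :: t) := by
        simp only [pvMaxLen_cons, Nat.max_def]; split_ifs <;> omega
      rw [hM]
      have hhf : (h.length == pvMaxLen (b :: t)) = false := by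
        have := pv_len_le_maxLen b t
        simp only [beq_eq_false_iff_ne, ne_eq]; omega
      simp [List.filter_cons, hhf]

theorem pv_maxLen_attained (g : List (Int × Int)) (gs : List (List (Int × Int))) :
    ∃ x ∈ g :: gs, x.length = pvMaxLen (g :: gs) := by
  induction gs generalizing g with
  | nil => exact ⟨g, by simp, by simp [pvMaxLen]⟩
  | cons h t ih =>
    obtain ⟨x, hx, hlen⟩ := ih h
    by_cases hc : pvMaxLen (h :: t) ≤ g.length
    · exact ⟨g, by simp, by rw [pvMaxLen_cons]; exact (Nat.max_eq_left hc).symm⟩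
    · refine ⟨x, by simpa using Or.inr hx, ?_⟩
      have : pvMaxLen (g :: h :: t) = pvMaxLen (h :: t) := by
        rw [pvMaxLen_cons]; exact Nat.max_eq_right (by omega)
      omega

theorem pv_max?_aux (l : List Nat) (a : Nat) :
    PySem.List.max? (a :: l) (fun n => n) = some (l.foldl Nat.max a) := by
  induction l generalizing a with
  | nil => simp [PySem.List.max?]
  | cons b t ih =>
    have h2 := ih (if a < b then b else a)
    have hmax : Nat.max a b = if a < b then b else a := by
      rcases Nat.lt_or_ge a b with h | h
      · rw [if_pos h]; exact Nat.max_eq_right (Nat.le_of_lt h)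
      · rw [if_neg (Nat.not_lt.mpr h)]; exact Nat.max_eq_left h
    simp only [PySem.List.max?, List.foldl_cons] at h2 ⊢
    rw [show (if a < b then some b else some a) = some (if a < b then b else a) from
      (apply_ite some _ _ _).symm, hmax]
    exact h2

theorem pv_foldl_max_eq (gs : List (List (Int × Int))) (a : Nat) :
    List.foldl Nat.max a (gs.map List.length) = Nat.max a (pvMaxLen gs) := by
  induction gs generalizing a with
  | nil => simp [pvMaxLen]
  | cons h t ih =>
    simp only [List.map_cons, List.foldl_cons, ih, pvMaxLen_cons]
    exact Nat.max_assoc _ _ _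

theorem pv_top_eq (g : List (Int × Int)) (gs : List (List (Int × Int))) :
    (PySem.List.max? ((g :: gs).map List.length) (fun n => n)).getD 0 = pvMaxLen (g :: gs) := by
  simp only [List.map_cons, pv_max?_aux, Option.getD_some, pv_foldl_max_eq, pvMaxLen_cons]

theorem pv_cached_fold (maps : List (List Int)) (rest : List (List (Int × Int)))
    (c : List (Int × Int)) :
    (rest.foldl (fun (st : List (Int × Int) × (Int × Int × Int)) bg =>
        let k := pvKeyB maps bg
        if pvKeyGE k st.2 then (bg, k) else st) (c, pvKeyB maps c)).1 =
      rest.foldl (pvRBStep maps) c := by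
  induction rest generalizing c with
  | nil => rfl
  | cons h t ih =>
    simp only [List.foldl_cons]
    by_cases hk : pvKeyGE (pvKeyB maps h) (pvKeyB maps c) = true
    · have e : pvRBStep maps c h = h := by unfold pvRBStep; rw [if_pos hk]
      simp only [hk, if_pos, e, ih h]
    · have e : pvRBStep maps c h = c := by
        unfold pvRBStep; rw [if_neg (by simpa using hk)]
      simp only [hk]
      simp only [Bool.false_eq_true, if_false, e, ih c]

theorem pv_B_eq_pick (maps : List (List Int)) (bgs : List (List (Int × Int))) :
    find_largest_block_group_alt maps bgs =
      pvPick maps (bgs.filter (fun g => g.length == pvMaxLen bgs)) := by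
  cases bgs with
  | nil => rfl
  | cons g gs =>
    unfold find_largest_block_group_alt
    simp only [pv_top_eq]
    cases hf : (g :: gs).filter (fun x => x.length == pvMaxLen (g :: gs)) with
    | nil =>
      exfalso
      obtain ⟨x, hx, hlen⟩ := pv_maxLen_attained g gs
      have : x ∈ (g :: gs).filter (fun x => x.length == pvMaxLen (g :: gs)) :=
        List.mem_filter.mpr ⟨hx, by simp [hlen]⟩
      rw [hf] at this
      exact (List.not_mem_nil).elim this
    | cons c rest =>
      cases rest with
      | nil => simp [pvPick]
      | cons r rs =>
        simp only [List.isEmpty_cons, Bool.false_eq_true, if_false, pvPick]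
        exact pv_cached_fold maps (r :: rs) c

theorem pv_main (maps : List (List Int)) (bgs : List (List (Int × Int))) :
    find_largest_block_group maps bgs = find_largest_block_group_alt maps bgs := by
  cases bgs with
  | nil => rfl
  | cons g gs =>
    rw [pv_A_eq_fold, pv_B_eq_pick]
    simp only [List.foldl_cons]
    have hsel : pvSel maps [] g = g := by
      unfold pvSel; rw [pv_fullGE_nil]; simp
    rw [hsel]
    exact pv_fold_eq_pick maps gs g

-- ===== VERDICT (by name: the statement is the Claim_ definition above) =====
theorem find_largest_block_group_spec : Claim_equal_find_largest_block_group := by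
  intro maps bgs _ _
  unfold Spec_find_largest_block_group
  exact pv_main maps bgs
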